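-- pv_equiv track=rewrite | github.com/sn8k/Jupiter-project | jupiter/core/quality/duplication.py | _is_intentional_mirror
-- ===== SOURCE A (Python) =====
-- def _is_intentional_mirror(file_path: str, start_line: int, raw_lines: list[str]) -> bool:
--     """Check if the duplication is intentionally mirrored (sync comment in docstring nearby).
--
--     Looks for patterns like:
--     - "mirrors" or "sync" in nearby docstring/comment
--     - "keep both in sync" or similar phrases
--
--     Args:
--         file_path: Path to the file
--         start_line: 1-based line number where duplication starts
--         raw_lines: All lines of the file
--
--     Returns:
--         True if this appears to be an intentional mirror, False otherwise.
--     """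
--     # Search in a window before the duplication start (class/function docstring area)
--     search_start = max(0, start_line - 20)
--     search_end = min(len(raw_lines), start_line + 5)
--
--     mirror_patterns = [
--         "mirrors",
--         "keep both in sync",
--         "keep in sync",
--         "synchronized with",
--         "synced with",
--         "# sync:",
--         "intentionally duplicated",
--     ]
--
--     for i in range(search_start, search_end):
--         line_lower = raw_lines[i].lower()
--         for pattern in mirror_patterns:
--             if pattern in line_lower:
--                 return True
--
--     return False
-- ===== SOURCE B (Python) =====
-- # Single left-to-right scan of the window text with a first-character dispatch
-- # table: at each position only patterns starting with that character are tried.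
-- _BY_FIRST = {
--     "m": ("mirrors",),
--     "k": ("keep both in sync", "keep in sync"),
--     "s": ("synchronized with", "synced with"),
--     "#": ("# sync:",),
--     "i": ("intentionally duplicated",),
-- }
--
--
-- def _is_intentional_mirror(file_path: str, start_line: int, raw_lines: list[str]) -> bool:
--     lo = max(0, start_line - 20)
--     hi = min(len(raw_lines), start_line + 5)
--     text = "\n".join(raw_lines[lo:max(lo, hi)]).lower()
--     for j, ch in enumerate(text):
--         for pattern in _BY_FIRST.get(ch, ()):
--             if text.startswith(pattern, j):
--                 return True
--     return False
-- ===== Notes on version B (the rewrite author's own statement) =====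
-- stated objective: alternative
-- what changed: B replaces A's pattern-driven nested loop (each window line tested against each of the 7 patterns with 'in') by a text-driven single left-to-right scan: the window is joined into one lowercased buffer and at each character position a first-character dispatch table selects the few candidate patterns to test with startswith at that position.
import Mathlib
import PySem

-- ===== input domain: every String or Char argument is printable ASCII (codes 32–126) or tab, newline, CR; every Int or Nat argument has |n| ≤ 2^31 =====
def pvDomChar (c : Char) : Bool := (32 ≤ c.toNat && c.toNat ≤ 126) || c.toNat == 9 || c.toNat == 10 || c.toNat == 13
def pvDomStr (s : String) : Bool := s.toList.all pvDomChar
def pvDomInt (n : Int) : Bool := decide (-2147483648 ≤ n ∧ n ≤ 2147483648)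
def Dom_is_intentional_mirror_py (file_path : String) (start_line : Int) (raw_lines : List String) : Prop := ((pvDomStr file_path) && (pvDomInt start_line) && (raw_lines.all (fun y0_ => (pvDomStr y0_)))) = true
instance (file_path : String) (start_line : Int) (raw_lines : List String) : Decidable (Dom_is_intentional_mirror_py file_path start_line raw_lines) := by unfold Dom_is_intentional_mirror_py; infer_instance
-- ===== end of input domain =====

-- B replaces A's pattern-driven nested loop by a text-driven single left-to-right scan
-- of the joined lowercased window with a first-character dispatch table.

-- ===== PORT A =====
def pvMirrorPatterns : List String :=
  ["mirrors", "keep both in sync", "keep in sync", "synchronized with",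
   "synced with", "# sync:", "intentionally duplicated"]

def is_intentional_mirror_py (file_path : String) (start_line : Int) (raw_lines : List String) : Bool :=
  let searchStart := max 0 (start_line - 20)
  let searchEnd := min (PySem.List.len raw_lines) (start_line + 5)
  (PySem.List.pyRange searchStart searchEnd 1).any (fun i =>
    let lineLower := PySem.Str.lower (PySem.List.pyGetD raw_lines i "")
    pvMirrorPatterns.any (fun pattern => PySem.Str.isIn pattern lineLower))

-- ===== PORT B =====
-- the _BY_FIRST dict literal of Source B (get with default ())
def pvByFirst (c : Char) : List String :=
  if c = 'm' then ["mirrors"]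
  else if c = 'k' then ["keep both in sync", "keep in sync"]
  else if c = 's' then ["synchronized with", "synced with"]
  else if c = '#' then ["# sync:"]
  else if c = 'i' then ["intentionally duplicated"]
  else []

-- the 'for j, ch in enumerate(text)' scan: at each position test only the patterns
-- dispatched on text[j]; text.startswith(pattern, j) is a prefix test on the suffix
def pvScan : List Char → Bool
  | [] => false
  | c :: rest =>
      (pvByFirst c).any (fun pattern => pattern.toList.isPrefixOf (c :: rest)) || pvScan rest

def is_intentional_mirror_py_alt (file_path : String) (start_line : Int) (raw_lines : List String) : Bool :=
  let lo := max 0 (start_line - 20)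
  let hi := min (PySem.List.len raw_lines) (start_line + 5)
  let text := PySem.Str.lower (PySem.Str.join "\n" (PySem.List.slice raw_lines (some lo) (some (max lo hi))))
  pvScan text.toList

-- ===== PRECONDITION & SPEC =====
def Spec_is_intentional_mirror_py (file_path : String) (start_line : Int) (raw_lines : List String) (out : Bool) : Prop := out = is_intentional_mirror_py_alt file_path start_line raw_lines
instance (file_path : String) (start_line : Int) (raw_lines : List String) (out : Bool) : Decidable (Spec_is_intentional_mirror_py file_path start_line raw_lines out) := by unfold Spec_is_intentional_mirror_py; infer_instance

-- ===== CLAIM (what is proved, stated in full; the proofs are below) =====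
def Claim_equal_is_intentional_mirror_py : Prop := ∀ (file_path : String) (start_line : Int) (raw_lines : List String), Dom_is_intentional_mirror_py file_path start_line raw_lines → Spec_is_intentional_mirror_py file_path start_line raw_lines (is_intentional_mirror_py file_path start_line raw_lines)

-- ===== LEMMAS AND PROOFS =====

-- a list avoiding c is a prefix of a ++ c :: b iff it is a prefix of a
theorem pv_prefix_avoid {p : List Char} (a b : List Char) {c : Char} (hc : c ∉ p) :
    p <+: a ++ c :: b ↔ p <+: a := by
  induction p generalizing a with
  | nil => simp
  | cons q p' ih =>
    cases a with
    | nil =>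
      simp only [List.nil_append]
      constructor
      · intro h
        rcases (List.cons_prefix_cons).1 h with ⟨hq, _⟩
        exact absurd (hq ▸ List.mem_cons_self) hc
      · intro h
        exact absurd h (by simp)
    | cons x a' =>
      simp only [List.cons_append, List.cons_prefix_cons]
      constructor
      · rintro ⟨hq, hrest⟩
        exact ⟨hq, (ih a' (fun hm => hc (List.mem_cons_of_mem _ hm))).1 hrest⟩
      · rintro ⟨hq, hrest⟩
        exact ⟨hq, (ih a' (fun hm => hc (List.mem_cons_of_mem _ hm))).2 hrest⟩

-- an occurrence of a nonempty c-free list cannot cross the separator c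
theorem pv_infix_split {p : List Char} (a b : List Char) {c : Char}
    (hp : p ≠ []) (hc : c ∉ p) :
    p <:+: a ++ c :: b ↔ p <:+: a ∨ p <:+: b := by
  induction a with
  | nil =>
    simp only [List.nil_append, List.infix_cons_iff]
    have h1 : ¬ p <+: c :: b := fun h => by
      have := pv_prefix_avoid (p := p) [] b hc
      simp only [List.nil_append] at this
      exact hp (List.prefix_nil.1 (this.1 h))
    have h2 : ¬ p <:+: ([] : List Char) := fun h => hp (List.eq_nil_of_infix_nil h)
    tauto
  | cons x a' ih =>
    have hpfx : p <+: x :: (a' ++ c :: b) ↔ p <+: x :: a' := by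
      have := pv_prefix_avoid (p := p) (x :: a') b hc
      simpa using this
    simp only [List.cons_append, List.infix_cons_iff, hpfx, ih]
    tauto

-- substring of a c-joined buffer = substring of one of the pieces (p nonempty, c-free)
theorem pv_isIn_join {p : List Char} {c : Char} (hp : p ≠ []) (hc : c ∉ p) :
    ∀ ls : List (List Char),
      PySem.Chars.isIn p (PySem.Chars.join [c] ls) = ls.any (fun l => PySem.Chars.isIn p l) := by
  intro ls
  induction ls with
  | nil =>
    rw [PySem.Chars.join_nil]
    simp only [List.any_nil]
    rw [PySem.Chars.isIn_eq_false_iff]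
    intro h
    exact hp (List.eq_nil_of_infix_nil h)
  | cons a t ih =>
    cases t with
    | nil =>
      rw [PySem.Chars.join_singleton]
      simp
    | cons b t' =>
      rw [PySem.Chars.join_cons_cons, List.append_assoc, List.singleton_append,
          Bool.eq_iff_iff, PySem.Chars.isIn_iff_infix, pv_infix_split a _ hp hc,
          List.any_cons, ← ih, Bool.or_eq_true, PySem.Chars.isIn_iff_infix,
          PySem.Chars.isIn_iff_infix]

-- lowercasing commutes with joining on '\n'
theorem pv_lower_join (ls : List (List Char)) :
    PySem.Chars.lower (PySem.Chars.join ['\n'] ls) =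
      PySem.Chars.join ['\n'] (ls.map PySem.Chars.lower) := by
  have hnl : PySem.Chars.lowerChar '\n' = '\n' := by decide
  induction ls with
  | nil => simp [PySem.Chars.join_nil, PySem.Chars.lower]
  | cons a t ih =>
    cases t with
    | nil => simp [PySem.Chars.join_singleton]
    | cons b t' =>
      rw [List.map_cons, List.map_cons, PySem.Chars.join_cons_cons, PySem.Chars.join_cons_cons]
      simp only [PySem.Chars.lower, List.map_cons] at ih ⊢
      simp only [List.map_append, ih, List.map_cons, List.map_nil, hnl]

-- A's index window, read through pyGetD, is exactly B's slice
theorem pv_window (raw : List String) :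
    ∀ (n : Nat) (lo hi : Int), 0 ≤ lo → hi ≤ raw.length → (hi - lo).toNat = n →
      (PySem.List.pyRange lo hi 1).map (fun i => PySem.List.pyGetD raw i "") =
        (raw.drop lo.toNat).take ((max lo hi).toNat - lo.toNat) := by
  intro n
  induction n with
  | zero =>
    intro lo hi h0 hh hn
    have hle : hi ≤ lo := by omega
    rw [PySem.List.pyRange_one_eq_nil hle]
    have : (max lo hi).toNat - lo.toNat = 0 := by omega
    simp [this]
  | succ k ih =>
    intro lo hi h0 hh hn
    have hlt : lo < hi := by omega
    rw [PySem.List.pyRange_one_cons hlt, List.map_cons]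
    have hidx : lo.toNat < raw.length := by omega
    have hget : PySem.List.pyGetD raw lo "" = raw[lo.toNat] :=
      PySem.List.pyGetD_eq_getElem raw "" h0 (by omega)
    have hdrop : raw.drop lo.toNat = raw[lo.toNat] :: raw.drop (lo.toNat + 1) :=
      List.drop_eq_getElem_cons hidx
    have htk : (max lo hi).toNat - lo.toNat = ((max (lo+1) hi).toNat - (lo+1).toNat) + 1 := by omega
    rw [hget, hdrop, htk, List.take_succ_cons]
    have := ih (lo + 1) hi (by omega) hh (by omega)
    rw [this]
    have : (lo + 1).toNat = lo.toNat + 1 := by omega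
    rw [this]

-- every dispatched pattern is one of the seven patterns
theorem pv_byFirst_sub (c : Char) (p : String) (hp : p ∈ pvByFirst c) : p ∈ pvMirrorPatterns := by
  unfold pvByFirst at hp
  split_ifs at hp <;> simp_all [pvMirrorPatterns] <;> tauto

-- a nonempty prefix of c :: rest has head c
theorem pv_head_of_prefix {p : List Char} {c : Char} {rest : List Char}
    (h : p <+: c :: rest) (hne : p ≠ []) : p.head? = some c := by
  cases p with
  | nil => exact absurd rfl hne
  | cons a t =>
    rcases List.cons_prefix_cons.1 h with ⟨rfl, -⟩
    rfl

-- a pattern whose first character is c is in the dispatch bucket of c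
theorem pv_byFirst_complete (p : String) (c : Char) (hp : p ∈ pvMirrorPatterns)
    (hc : p.toList.head? = some c) : p ∈ pvByFirst c := by
  fin_cases hp <;> (injection hc with h; subst h; decide)

theorem pv_prefix_byFirst {p : String} {c : Char} {rest : List Char}
    (hp : p ∈ pvMirrorPatterns) (hpre : p.toList <+: c :: rest) : p ∈ pvByFirst c := by
  apply pv_byFirst_complete p c hp
  apply pv_head_of_prefix hpre
  fin_cases hp <;> decide

-- B's position scan finds exactly the patterns occurring as substrings
theorem pv_scan_eq (s : List Char) :
    pvScan s = pvMirrorPatterns.any (fun p => PySem.Chars.isIn p.toList s) := by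
  induction s with
  | nil => decide
  | cons c rest ih =>
    rw [pvScan, ih, Bool.eq_iff_iff]
    simp only [Bool.or_eq_true, List.any_eq_true, PySem.Chars.isIn_iff_infix,
      List.infix_cons_iff, List.isPrefixOf_iff_prefix]
    constructor
    · rintro (⟨p, hp, hpre⟩ | ⟨p, hp, hinf⟩)
      · exact ⟨p, pv_byFirst_sub c p hp, Or.inl hpre⟩
      · exact ⟨p, hp, Or.inr hinf⟩
    · rintro ⟨p, hp, hpre | hinf⟩
      · exact Or.inl ⟨p, pv_prefix_byFirst hp hpre, hpre⟩
      · exact Or.inr ⟨p, hp, hinf⟩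

-- ===== VERDICT (by name: the statement is the Claim_ definition above) =====
theorem is_intentional_mirror_py_spec : Claim_equal_is_intentional_mirror_py := by
  intro file_path start_line raw_lines _
  unfold Spec_is_intentional_mirror_py is_intentional_mirror_py is_intentional_mirror_py_alt
  simp only [PySem.List.len_eq]
  set lo : Int := max 0 (start_line - 20) with hlo
  set hi : Int := min (raw_lines.length : Int) (start_line + 5) with hhi
  have h0 : 0 ≤ lo := le_max_left _ _
  have hh : hi ≤ (raw_lines.length : Int) := min_le_left _ _
  -- rewrite B's slice window as A's pyRange-indexed list
  have hslice : PySem.List.slice raw_lines (some lo) (some (max lo hi)) =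
      (PySem.List.pyRange lo hi 1).map (fun i => PySem.List.pyGetD raw_lines i "") := by
    rw [PySem.List.slice_toNat raw_lines h0 (le_trans h0 (le_max_left _ _)),
        pv_window raw_lines ((hi - lo).toNat) lo hi h0 hh rfl]
  rw [hslice, pv_scan_eq]
  -- move to Prop and to List Char, then swap the two quantifiers
  rw [Bool.eq_iff_iff]
  simp only [List.any_eq_true, PySem.Str.isIn_eq, PySem.Str.toList_lower,
    PySem.Str.toList_join, List.map_map]
  constructor
  · rintro ⟨i, hi_mem, pat, hpat, hin⟩
    refine ⟨pat, hpat, ?_⟩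
    have hpne : pat.toList ≠ [] ∧ '\n' ∉ pat.toList := by
      fin_cases hpat <;> decide
    rw [show ("\n" : String).toList = ['\n'] from rfl, pv_lower_join,
        pv_isIn_join hpne.1 hpne.2, List.any_eq_true]
    refine ⟨PySem.Chars.lower (PySem.List.pyGetD raw_lines i "").toList, ?_, hin⟩
    simp only [List.map_map, List.mem_map]
    exact ⟨i, hi_mem, rfl⟩
  · rintro ⟨pat, hpat, hin⟩
    have hpne : pat.toList ≠ [] ∧ '\n' ∉ pat.toList := by
      fin_cases hpat <;> decide
    rw [show ("\n" : String).toList = ['\n'] from rfl, pv_lower_join,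
        pv_isIn_join hpne.1 hpne.2, List.any_eq_true] at hin
    rcases hin with ⟨l, hl_mem, hl_in⟩
    simp only [List.map_map, List.mem_map] at hl_mem
    rcases hl_mem with ⟨i, hi_mem, rfl⟩
    exact ⟨i, hi_mem, pat, hpat, hl_in⟩
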